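-- pv_equiv track=rewrite | github.com/Rmbass22930/sturdy-spork | Shared-Python-Toolchain/security_gateway/service.py | _merge_string_values
-- ===== SOURCE A (Python) =====
-- from typing import Any, Mapping, cast
--
-- def _merge_string_values(existing: object, incoming: object) -> list[str]:
--     values = {
--         str(item).strip()
--         for item in cast(list[object], existing or [])
--         if str(item).strip()
--     }
--     values.update(
--         str(item).strip()
--         for item in cast(list[object], incoming or [])
--         if str(item).strip()
--     )
--     return sorted(values)
-- ===== SOURCE B (Python) =====
-- def _merge_string_values(existing: object, incoming: object) -> list[str]:
--     # Maintain `out` as a sorted, duplicate-free list at all times: each cleaned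
--     # string is placed by hand-written binary search (lower bound) and inserted
--     # only if not already present. No set is built and sorted() is never called.
--     out: list[str] = []
--     for source in (existing or [], incoming or []):
--         for item in source:
--             s = str(item).strip()
--             if not s:
--                 continue
--             lo, hi = 0, len(out)
--             while lo < hi:
--                 mid = (lo + hi) // 2
--                 if out[mid] < s:
--                     lo = mid + 1
--                 else:
--                     hi = mid
--             if lo == len(out) or out[lo] != s:
--                 out.insert(lo, s)
--     return out
-- ===== Notes on version B (the rewrite author's own statement) =====
-- stated objective: alternative
-- what changed: B never builds a set and never calls sorted(): it maintains the result as an always-sorted duplicate-free list, placing each cleaned string by a hand-written binary search (lower bound) and inserting it only when absent, so ordering and deduplication are an invariant of the accumulator rather than a final sort over a hash set.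
import Mathlib
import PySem

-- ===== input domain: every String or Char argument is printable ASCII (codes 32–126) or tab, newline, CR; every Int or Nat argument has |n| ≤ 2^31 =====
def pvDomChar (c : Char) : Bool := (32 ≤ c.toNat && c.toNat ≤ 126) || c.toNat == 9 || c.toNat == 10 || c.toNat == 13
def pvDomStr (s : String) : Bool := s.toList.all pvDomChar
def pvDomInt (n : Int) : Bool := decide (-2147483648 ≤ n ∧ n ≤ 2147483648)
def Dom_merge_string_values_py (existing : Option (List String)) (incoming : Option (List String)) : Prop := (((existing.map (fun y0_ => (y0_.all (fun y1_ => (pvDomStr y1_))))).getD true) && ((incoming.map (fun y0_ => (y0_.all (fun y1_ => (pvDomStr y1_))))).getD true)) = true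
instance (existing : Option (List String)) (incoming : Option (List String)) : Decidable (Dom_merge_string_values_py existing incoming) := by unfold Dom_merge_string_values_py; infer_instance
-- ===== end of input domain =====

-- B keeps the result as an always-sorted duplicate-free list via binary-search insertion (no set, no final sort); alternative algorithm.


-- ===== PORT A =====
def merge_string_values_py (existing : Option (List String)) (incoming : Option (List String)) : List String :=
  -- values = {str(item).strip() for item in (existing or []) if str(item).strip()}
  let values : PySem.Set String :=
    PySem.Set.ofList (((existing.getD []).map (fun item => PySem.Str.strip item)).filter
      (fun s => !(s == "")))
  -- values.update(str(item).strip() for item in (incoming or []) if str(item).strip())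
  let values := PySem.Set.update values
    (((incoming.getD []).map (fun item => PySem.Str.strip item)).filter (fun s => !(s == "")))
  PySem.List.sorted values (fun x => x) false

-- ===== PORT B =====
-- the 'while lo < hi' binary-search loop of Source B (out[mid] is in range whenever hi ≤ len out,
-- so List.getD is exact there)
def pvBisect (out : List String) (s : String) (lo hi : Nat) : Nat :=
  if lo < hi then
    let mid := (lo + hi) / 2
    if out.getD mid "" < s then pvBisect out s (mid + 1) hi else pvBisect out s lo mid
  else lo
termination_by hi - lo
decreasing_by all_goals omega

-- the body of Source B's inner loop: clean the item, find its lower bound, insert if absent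
def pvStep (out : List String) (item : String) : List String :=
  let s := PySem.Str.strip item
  if s == "" then out
  else
    let lo := pvBisect out s 0 out.length
    if lo == out.length || !(out.getD lo "" == s) then
      PySem.List.insert out (lo : Int) s
    else out

def merge_string_values_py_alt (existing : Option (List String)) (incoming : Option (List String)) : List String :=
  -- for source in (existing or [], incoming or []): for item in source: …
  [existing.getD [], incoming.getD []].foldl (fun out source => source.foldl pvStep out) []

-- ===== PRECONDITION & SPEC =====
def Spec_merge_string_values_py (existing : Option (List String)) (incoming : Option (List String)) (out : List String) : Prop := out = merge_string_values_py_alt existing incoming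
instance (existing : Option (List String)) (incoming : Option (List String)) (out : List String) : Decidable (Spec_merge_string_values_py existing incoming out) := by unfold Spec_merge_string_values_py; infer_instance

-- ===== CLAIM (what is proved, stated in full; the proofs are below) =====
def Claim_equal_merge_string_values_py : Prop := ∀ (existing : Option (List String)) (incoming : Option (List String)), Dom_merge_string_values_py existing incoming → Spec_merge_string_values_py existing incoming (merge_string_values_py existing incoming)

-- ===== LEMMAS AND PROOFS =====

-- number of elements < s in a ≤-sorted list (= the lower-bound index pvBisect computes)
def pvLB (s : String) : List String → Nat
  | [] => 0
  | x :: t => if x < s then pvLB s t + 1 else 0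

-- ordered insert-if-absent (specification of one pvStep on a sorted list)
def pvOIns (s : String) : List String → List String
  | [] => [s]
  | x :: t => if s < x then s :: x :: t else if s = x then x :: t else x :: pvOIns s t

theorem pvLB_le_length (s : String) (out : List String) : pvLB s out ≤ out.length := by
  induction out with
  | nil => simp [pvLB]
  | cons x t ih => simp only [pvLB, List.length_cons]; split <;> omega

theorem pvLB_lt (s : String) (out : List String) : ∀ i < pvLB s out, out.getD i "" < s := by
  induction out with
  | nil => simp [pvLB]
  | cons x t ih =>
    intro i hi
    by_cases hxs : x < s
    · simp only [pvLB, if_pos hxs] at hi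
      cases i with
      | zero => rw [List.getD_cons_zero]; exact hxs
      | succ j => rw [List.getD_cons_succ]; exact ih j (by omega)
    · simp [pvLB, hxs] at hi

theorem pvLB_ge (s : String) (out : List String) (hs : out.Pairwise (· ≤ ·)) :
    ∀ i, pvLB s out ≤ i → i < out.length → ¬ out.getD i "" < s := by
  induction out with
  | nil => simp
  | cons x t ih =>
    rcases List.pairwise_cons.mp hs with ⟨hx, ht⟩
    intro i h1 h2
    simp only [pvLB] at h1
    split at h1
    · cases i with
      | zero => omega
      | succ j =>
        rw [List.getD_cons_succ]
        exact ih ht j (by omega) (by simpa using h2)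
    · rename_i hxs
      cases i with
      | zero => simpa using hxs
      | succ j =>
        rw [List.getD_cons_succ]
        have hjt : j < t.length := by simpa using h2
        have hmem : t.getD j "" ∈ t := by
          rw [List.getD_eq_getElem t _ hjt]; exact List.getElem_mem hjt
        intro hlt
        exact hxs (lt_of_le_of_lt (hx _ hmem) hlt)

theorem pvBisect_eq (s : String) (out : List String) (hs : out.Pairwise (· ≤ ·)) :
    ∀ n lo hi, hi - lo ≤ n → lo ≤ pvLB s out → pvLB s out ≤ hi → hi ≤ out.length →
      pvBisect out s lo hi = pvLB s out := by
  intro n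
  induction n with
  | zero => intro lo hi h1 h2 h3 h4; rw [pvBisect]; simp only [if_neg (by omega : ¬ lo < hi)]; omega
  | succ m ih =>
    intro lo hi h1 h2 h3 h4
    rw [pvBisect]
    by_cases hlh : lo < hi
    · rw [if_pos hlh]
      set mid := (lo + hi) / 2 with hmid
      have hml : lo ≤ mid := by omega
      have hmh : mid < hi := by omega
      by_cases hc : out.getD mid "" < s
      · rw [if_pos hc]
        have : mid < pvLB s out := by
          by_contra hcon
          exact pvLB_ge s out hs mid (by omega) (by omega) hc
        exact ih (mid + 1) hi (by omega) (by omega) h3 h4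
      · rw [if_neg hc]
        have : pvLB s out ≤ mid := by
          by_contra hcon
          exact hc (pvLB_lt s out mid (by omega))
        exact ih lo mid (by omega) h2 this (by omega)
    · rw [if_neg hlh]; omega

-- on a ≤-sorted list, binary-search insert-if-absent is exactly the ordered insert pvOIns
theorem pvCore_eq (s : String) (out : List String) (hs : out.Pairwise (· ≤ ·)) :
    (if pvLB s out == out.length || !(out.getD (pvLB s out) "" == s) then
        PySem.List.insert out ((pvLB s out : Nat) : Int) s
      else out) = pvOIns s out := by
  induction out with
  | nil => simp [pvLB, pvOIns, PySem.List.insert_zero]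
  | cons x t ih =>
    rcases List.pairwise_cons.mp hs with ⟨hx, ht⟩
    by_cases hxs : x < s
    · have hne1 : ¬ s < x := not_lt_of_gt hxs
      have hne2 : s ≠ x := (ne_of_gt hxs)
      have hlb : pvLB s (x :: t) = pvLB s t + 1 := by simp [pvLB, hxs]
      have hcond : (pvLB s (x :: t) == (x :: t).length
            || !((x :: t).getD (pvLB s (x :: t)) "" == s))
          = (pvLB s t == t.length || !(t.getD (pvLB s t) "" == s)) := by
        rw [hlb, List.getD_cons_succ, List.length_cons]
        simp
      have hins : PySem.List.insert (x :: t) ((pvLB s (x :: t) : Nat) : Int) s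
          = x :: PySem.List.insert t ((pvLB s t : Nat) : Int) s := by
        rw [hlb,
          PySem.List.insert_natCast _ _ _ (by simpa using Nat.succ_le_succ (pvLB_le_length s t)),
          PySem.List.insert_natCast _ _ _ (pvLB_le_length s t)]
        simp [List.take_succ_cons, List.drop_succ_cons]
      rw [hcond, hins]
      show (if _ then x :: PySem.List.insert t _ s else x :: t) = pvOIns s (x :: t)
      simp only [pvOIns, if_neg hne1, if_neg hne2]
      by_cases hc : (pvLB s t == t.length || !(t.getD (pvLB s t) "" == s)) = true
      · rw [if_pos hc]; rw [← ih ht, if_pos hc]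
      · rw [if_neg hc]; rw [← ih ht, if_neg hc]
    · have hlb : pvLB s (x :: t) = 0 := by simp [pvLB, hxs]
      by_cases hsx : s = x
      · subst hsx
        simp [pvOIns, pvLB, lt_self_iff_false]
      · have hslt : s < x := lt_of_le_of_ne (not_lt.mp hxs) hsx
        rw [hlb]
        have hcond : ((0 : Nat) == (x :: t).length || !((x :: t).getD 0 "" == s)) = true := by
          simp [Ne.symm hsx]
        rw [if_pos hcond]
        simp only [pvOIns, if_pos hslt]
        simpa using PySem.List.insert_zero (x :: t) s

theorem pvOIns_mem (s : String) (out : List String) :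
    ∀ a, a ∈ pvOIns s out ↔ a = s ∨ a ∈ out := by
  induction out with
  | nil => simp [pvOIns]
  | cons x t ih =>
    intro a
    by_cases h1 : s < x
    · simp only [pvOIns, if_pos h1]
      simp [List.mem_cons]
    · by_cases h2 : s = x
      · subst h2
        simp only [pvOIns, if_neg h1]
        simp [List.mem_cons]
      · simp only [pvOIns, if_neg h1, if_neg h2]
        simp [List.mem_cons, ih]; tauto

theorem pvOIns_pairwise (s : String) (out : List String) (h : out.Pairwise (· < ·)) :
    (pvOIns s out).Pairwise (· < ·) := by
  induction out with
  | nil => simp [pvOIns]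
  | cons x t ih =>
    rcases List.pairwise_cons.mp h with ⟨hx, ht⟩
    by_cases h1 : s < x
    · simp only [pvOIns, if_pos h1]
      refine List.pairwise_cons.mpr ⟨?_, h⟩
      intro b hb
      rcases List.mem_cons.mp hb with rfl | hb
      · exact h1
      · exact lt_trans h1 (hx b hb)
    · by_cases h2 : s = x
      · simp only [pvOIns, if_neg h1, if_pos h2]
        exact h
      · simp only [pvOIns, if_neg h1, if_neg h2]
        have hxs : x < s := lt_of_le_of_ne (not_lt.mp h1) (fun he => h2 he.symm)
        refine List.pairwise_cons.mpr ⟨?_, ih ht⟩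
        intro b hb
        rcases (pvOIns_mem s t b).mp hb with rfl | hb
        · exact hxs
        · exact hx b hb

-- one pvStep on a <-sorted accumulator is: skip empty strings, else ordered insert-if-absent
theorem pvStep_eq (out : List String) (item : String) (h : out.Pairwise (· < ·)) :
    pvStep out item =
      (if PySem.Str.strip item == "" then out else pvOIns (PySem.Str.strip item) out) := by
  unfold pvStep
  set s := PySem.Str.strip item
  by_cases he : (s == "") = true
  · simp [he]
  · rw [if_neg he, if_neg he]
    have hle : out.Pairwise (· ≤ ·) := h.imp le_of_lt
    rw [pvBisect_eq s out hle out.length 0 out.length (by omega) (by omega)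
      (pvLB_le_length s out) (le_refl _)]
    exact pvCore_eq s out hle

def pvCleanL (L : List String) : List String :=
  (L.map (fun item => PySem.Str.strip item)).filter (fun s => !(s == ""))

theorem pvFold_invariant (L : List String) :
    ∀ acc, acc.Pairwise (· < ·) →
      (L.foldl pvStep acc).Pairwise (· < ·) ∧
      (∀ a, a ∈ L.foldl pvStep acc ↔ a ∈ acc ∨ a ∈ pvCleanL L) := by
  induction L with
  | nil => intro acc h; exact ⟨h, by simp [pvCleanL]⟩
  | cons y ys ih =>
    intro acc h
    rw [List.foldl_cons, pvStep_eq acc y h]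
    by_cases he : (PySem.Str.strip y == "") = true
    · have hclean : pvCleanL (y :: ys) = pvCleanL ys := by
        simp only [pvCleanL, List.map_cons, List.filter_cons, he, Bool.not_true]
        rfl
      rw [if_pos he]
      have := ih acc h
      refine ⟨this.1, fun a => ?_⟩
      rw [this.2 a, hclean]
    · have hf : (PySem.Str.strip y == "") = false := by
        cases hb : (PySem.Str.strip y == "") with
        | false => rfl
        | true => exact absurd hb he
      have hclean : pvCleanL (y :: ys) = PySem.Str.strip y :: pvCleanL ys := by
        simp only [pvCleanL, List.map_cons, List.filter_cons, hf, Bool.not_false]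
        rfl
      rw [if_neg he]
      have hsort := pvOIns_pairwise (PySem.Str.strip y) acc h
      have := ih _ hsort
      refine ⟨this.1, fun a => ?_⟩
      rw [this.2 a, pvOIns_mem, hclean, List.mem_cons]
      constructor
      · rintro ((h1 | h1) | h1)
        · exact Or.inr (Or.inl h1)
        · exact Or.inl h1
        · exact Or.inr (Or.inr h1)
      · rintro (h1 | h1 | h1)
        · exact Or.inl (Or.inr h1)
        · exact Or.inl (Or.inl h1)
        · exact Or.inr h1

theorem pvMain_eq (e i : List String) :
    PySem.List.sorted (PySem.Set.update (PySem.Set.ofList (pvCleanL e)) (pvCleanL i))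
        (fun x => x) false
      = [e, i].foldl (fun out source => source.foldl pvStep out) [] := by
  have hA : PySem.Set.update (PySem.Set.ofList (pvCleanL e)) (pvCleanL i)
      = PySem.Set.ofList (pvCleanL (e ++ i)) := by
    rw [show pvCleanL (e ++ i) = pvCleanL e ++ pvCleanL i by
      simp [pvCleanL, List.map_append, List.filter_append]]
    rw [PySem.Set.ofList_append]
  have hB : [e, i].foldl (fun out source => source.foldl pvStep out) []
      = (e ++ i).foldl pvStep [] := by
    simp [List.foldl_append]
  rw [hA, hB]
  have hinv := pvFold_invariant (e ++ i) [] List.Pairwise.nil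
  have hperm : ((e ++ i).foldl pvStep []).Perm (PySem.Set.ofList (pvCleanL (e ++ i))) := by
    have hnd : ((e ++ i).foldl pvStep []).Nodup := hinv.1.imp ne_of_lt
    rw [List.perm_ext_iff_of_nodup hnd (PySem.Set.nodup_ofList _)]
    intro a
    rw [hinv.2 a, PySem.Set.mem_ofList]
    simp
  exact PySem.List.sorted_eq_of_perm_of_pairwise_lt _ _ _ hperm hinv.1

theorem merge_string_values_py_eq (existing incoming : Option (List String)) :
    merge_string_values_py existing incoming = merge_string_values_py_alt existing incoming :=
  pvMain_eq (existing.getD []) (incoming.getD [])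

-- ===== VERDICT (by name: the statement is the Claim_ definition above) =====
theorem merge_string_values_py_spec : Claim_equal_merge_string_values_py := by
  intro existing incoming _
  unfold Spec_merge_string_values_py
  exact merge_string_values_py_eq existing incoming
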